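-- pv_equiv track=rewrite | github.com/piyushchhabra/streamlit-experiments | dividend.py | is_dividend
-- ===== SOURCE A (Python) =====
-- def is_dividend(summary):
--     if summary is None or len(summary) < 3:
--         return False
--     if summary.startswith("NEFT") or summary.startswith("UPI"):
--         return False
--     if "ACH C-" in summary or " DIV " in summary:
--         return True
--     for i in range(0, 10):
--         x = " DIV" + str(i)
--         if x in summary:
--             return True
--     return False
-- ===== SOURCE B (Python) =====
-- def is_dividend(summary):
--     if summary is None or len(summary) < 3:
--         return False
--     if summary.startswith("NEFT") or summary.startswith("UPI"):
--         return False
--     if "ACH C-" in summary: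
--         return True
--     for i in range(len(summary)):
--         if summary.startswith(" DIV", i) and i + 4 < len(summary) and summary[i + 4] in " 0123456789":
--             return True
--     return False
-- ===== Notes on version B (the rewrite author's own statement) =====
-- stated objective: idiomatic
-- what changed: A runs eleven separate substring scans (' DIV ' plus ' DIV0'..' DIV9' built in a loop); B makes one left-to-right pass, testing ' DIV' at each position and checking whether the character after it is a space or an ASCII digit.
import Mathlib
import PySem

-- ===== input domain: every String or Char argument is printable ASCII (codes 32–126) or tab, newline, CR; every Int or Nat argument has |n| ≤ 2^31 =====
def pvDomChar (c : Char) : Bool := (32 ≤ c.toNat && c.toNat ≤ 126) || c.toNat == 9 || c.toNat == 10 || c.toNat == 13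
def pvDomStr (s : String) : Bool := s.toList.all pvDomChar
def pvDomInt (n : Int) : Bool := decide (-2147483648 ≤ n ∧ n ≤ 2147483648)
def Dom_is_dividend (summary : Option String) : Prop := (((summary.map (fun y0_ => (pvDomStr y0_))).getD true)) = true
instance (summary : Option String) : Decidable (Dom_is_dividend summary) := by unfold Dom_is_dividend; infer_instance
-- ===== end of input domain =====

-- B replaces A's eleven separate substring scans (" DIV ", " DIV0" … " DIV9") by one
-- left-to-right pass that tests " DIV" at each position and inspects the following
-- character (idiomatic single scan; same result).

-- ===== PORT A =====
def is_dividend (summary : Option String) : Bool :=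
  match summary with
  | none => false
  | some s =>
    let cs := s.toList
    if cs.length < 3 then false
    else if PySem.Chars.startswith cs "NEFT".toList || PySem.Chars.startswith cs "UPI".toList then false
    else if PySem.Chars.isIn "ACH C-".toList cs || PySem.Chars.isIn " DIV ".toList cs then true
    else (PySem.List.pyRange 0 10 1).foldl
      (fun acc i => acc || PySem.Chars.isIn (" DIV".toList ++ PySem.Int.toChars i) cs) false

-- ===== PORT B =====
-- Source B's membership test `summary[i+4] in " 0123456789"`
def pvDig (c : Char) : Bool := PySem.Chars.isIn [c] " 0123456789".toList

-- Source B's per-position test `summary.startswith(" DIV", i) and i+4 < len(summary) and summary[i+4] in " 0123456789"`, read on the suffix starting at i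
def pvHead5 : List Char → Bool
  | a :: b :: d :: e :: f :: _ => a == ' ' && b == 'D' && d == 'I' && e == 'V' && pvDig f
  | _ => false

-- Source B's `for i in range(len(summary))` loop: test at each position, advance one char
def pvScan : List Char → Bool
  | [] => false
  | c :: rest => pvHead5 (c :: rest) || pvScan rest

def is_dividend_alt (summary : Option String) : Bool :=
  match summary with
  | none => false
  | some s =>
    let cs := s.toList
    if cs.length < 3 then false
    else if PySem.Chars.startswith cs "NEFT".toList || PySem.Chars.startswith cs "UPI".toList then false
    else if PySem.Chars.isIn "ACH C-".toList cs then true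
    else pvScan cs

-- ===== PRECONDITION & SPEC =====
def Spec_is_dividend (summary : Option String) (out : Bool) : Prop := out = is_dividend_alt summary
instance (summary : Option String) (out : Bool) : Decidable (Spec_is_dividend summary out) := by unfold Spec_is_dividend; infer_instance

-- ===== CLAIM (what is proved, stated in full; the proofs are below) =====
def Claim_equal_is_dividend : Prop := ∀ (summary : Option String), Dom_is_dividend summary → Spec_is_dividend summary (is_dividend summary)

-- ===== LEMMAS AND PROOFS =====

-- B's scan finds a hit iff some suffix passes the 5-character head test
lemma pvScan_iff (cs : List Char) : pvScan cs = true ↔ ∃ t, pvHead5 t = true ∧ t <:+ cs := by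
  induction cs with
  | nil => simp [pvScan, show pvHead5 [] = false from rfl]
  | cons c rest ih =>
    simp only [pvScan, Bool.or_eq_true, ih]
    constructor
    · rintro (h | ⟨t, ht, hs⟩)
      · exact ⟨c :: rest, h, List.suffix_refl _⟩
      · exact ⟨t, ht, hs.trans (List.suffix_cons c rest)⟩
    · rintro ⟨t, ht, hs⟩
      rcases List.suffix_cons_iff.mp hs with rfl | hs'
      · exact Or.inl ht
      · exact Or.inr ⟨t, ht, hs'⟩

lemma pvHead5_iff (t : List Char) : pvHead5 t = true ↔
    ∃ c r, pvDig c = true ∧ t = ' ' :: 'D' :: 'I' :: 'V' :: c :: r := by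
  rcases t with _|⟨a,_|⟨b,_|⟨d,_|⟨e,_|⟨f,r⟩⟩⟩⟩⟩ <;> simp [pvHead5]
  aesop

lemma head5_concrete (c : Char) (r : List Char) (h : pvDig c = true) :
    pvHead5 (' ' :: 'D' :: 'I' :: 'V' :: c :: r) = true := by simp [pvHead5, h]

lemma infix_head5 {c : Char} (hc : pvDig c = true) {cs : List Char}
    (h : [' ', 'D', 'I', 'V', c] <:+: cs) : ∃ t, pvHead5 t = true ∧ t <:+ cs := by
  obtain ⟨t, hp, hs⟩ := List.infix_iff_prefix_suffix.mp h
  obtain ⟨r, rfl⟩ := hp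
  exact ⟨_, head5_concrete c r hc, hs⟩

-- the heart of the proof: A's " DIV " test plus its ten-pattern loop equals B's single scan
lemma key (cs : List Char) :
    (PySem.Chars.isIn " DIV ".toList cs ||
      (PySem.List.pyRange 0 10 1).foldl
        (fun acc i => acc || PySem.Chars.isIn (" DIV".toList ++ PySem.Int.toChars i) cs) false)
    = pvScan cs := by
  rw [Bool.eq_iff_iff, pvScan_iff]
  simp only [Bool.or_eq_true,
    show ((PySem.List.pyRange 0 10 1).foldl
        (fun acc i => acc || PySem.Chars.isIn (" DIV".toList ++ PySem.Int.toChars i) cs) false)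
      = (PySem.Chars.isIn [' ','D','I','V','0'] cs || PySem.Chars.isIn [' ','D','I','V','1'] cs ||
         PySem.Chars.isIn [' ','D','I','V','2'] cs || PySem.Chars.isIn [' ','D','I','V','3'] cs ||
         PySem.Chars.isIn [' ','D','I','V','4'] cs || PySem.Chars.isIn [' ','D','I','V','5'] cs ||
         PySem.Chars.isIn [' ','D','I','V','6'] cs || PySem.Chars.isIn [' ','D','I','V','7'] cs ||
         PySem.Chars.isIn [' ','D','I','V','8'] cs || PySem.Chars.isIn [' ','D','I','V','9'] cs) from rfl,
    show " DIV ".toList = [' ','D','I','V',' '] from rfl,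
    PySem.Chars.isIn_iff_infix, or_assoc]
  constructor
  · rintro (h|h|h|h|h|h|h|h|h|h|h) <;> exact infix_head5 (by decide) h
  · rintro ⟨t, ht, hs⟩
    obtain ⟨c, r, hc, rfl⟩ := (pvHead5_iff t).mp ht
    have hx : [' ','D','I','V',c] <:+: cs := List.infix_iff_prefix_suffix.mpr ⟨_, ⟨r, rfl⟩, hs⟩
    have hmem : c = ' ' ∨ c = '0' ∨ c = '1' ∨ c = '2' ∨ c = '3' ∨ c = '4' ∨ c = '5' ∨
        c = '6' ∨ c = '7' ∨ c = '8' ∨ c = '9' := by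
      simpa [pvDig, PySem.Chars.isIn_iff_infix, List.singleton_infix_iff] using hc
    rcases hmem with rfl|rfl|rfl|rfl|rfl|rfl|rfl|rfl|rfl|rfl|rfl <;> tauto

lemma body (cs : List Char) :
    (if cs.length < 3 then false
     else if PySem.Chars.startswith cs "NEFT".toList || PySem.Chars.startswith cs "UPI".toList then false
     else if PySem.Chars.isIn "ACH C-".toList cs || PySem.Chars.isIn " DIV ".toList cs then true
     else (PySem.List.pyRange 0 10 1).foldl
       (fun acc i => acc || PySem.Chars.isIn (" DIV".toList ++ PySem.Int.toChars i) cs) false) =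
    (if cs.length < 3 then false
     else if PySem.Chars.startswith cs "NEFT".toList || PySem.Chars.startswith cs "UPI".toList then false
     else if PySem.Chars.isIn "ACH C-".toList cs then true
     else pvScan cs) := by
  by_cases h1 : cs.length < 3
  · rw [if_pos h1, if_pos h1]
  rw [if_neg h1, if_neg h1]
  by_cases h2 : (PySem.Chars.startswith cs "NEFT".toList || PySem.Chars.startswith cs "UPI".toList) = true
  · rw [if_pos h2, if_pos h2]
  rw [if_neg h2, if_neg h2]
  by_cases h3 : PySem.Chars.isIn "ACH C-".toList cs = true
  · rw [if_pos (by rw [Bool.or_eq_true]; exact Or.inl h3), if_pos h3]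
  rw [if_neg h3]
  have hk := key cs
  by_cases h4 : PySem.Chars.isIn " DIV ".toList cs = true
  · rw [if_pos (by rw [Bool.or_eq_true]; exact Or.inr h4)]
    rw [h4] at hk
    simpa using hk.symm
  · rw [if_neg (fun hc => by rw [Bool.or_eq_true] at hc; exact hc.elim h3 h4)]
    rw [Bool.not_eq_true] at h4
    rw [h4] at hk
    simpa using hk

-- ===== VERDICT (by name: the statement is the Claim_ definition above) =====
theorem is_dividend_spec : Claim_equal_is_dividend := by
  intro summary _
  unfold Spec_is_dividend
  cases summary with
  | none => rfl
  | some s => exact body s.toList
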